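-- pv_equiv track=rewrite | github.com/raykeating/TSP_GA | population.py | check_chromosome_validity
-- ===== SOURCE A (Python) =====
-- def check_chromosome_validity(route):
--     # check that there are no duplicates in the route
--
--     # convert route to a set of numbers
--     route_as_ints = []
--     for city in route:
--         if city:
--             route_as_ints.append(city["number"])
--
--     if len(route) == len(set(route_as_ints)):
--         return False
--     else:
--         return True
-- ===== SOURCE B (Python) =====
-- def check_chromosome_validity(route):
--     # sort the collected city numbers, count distinct values in one linear
--     # pass over adjacent pairs, and compare that count with len(route)
--     nums = sorted(city["number"] for city in route if city)
--     distinct = (1 if nums else 0) + sum(1 for a, b in zip(nums, nums[1:]) if a != b)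
--     return distinct != len(route)
-- ===== Notes on version B (the rewrite author's own statement) =====
-- stated objective: alternative
-- what changed: replaces building a set and comparing its size with sorting the collected city numbers and counting distinct values in one adjacent-pair pass before comparing with len(route)
import Mathlib
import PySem

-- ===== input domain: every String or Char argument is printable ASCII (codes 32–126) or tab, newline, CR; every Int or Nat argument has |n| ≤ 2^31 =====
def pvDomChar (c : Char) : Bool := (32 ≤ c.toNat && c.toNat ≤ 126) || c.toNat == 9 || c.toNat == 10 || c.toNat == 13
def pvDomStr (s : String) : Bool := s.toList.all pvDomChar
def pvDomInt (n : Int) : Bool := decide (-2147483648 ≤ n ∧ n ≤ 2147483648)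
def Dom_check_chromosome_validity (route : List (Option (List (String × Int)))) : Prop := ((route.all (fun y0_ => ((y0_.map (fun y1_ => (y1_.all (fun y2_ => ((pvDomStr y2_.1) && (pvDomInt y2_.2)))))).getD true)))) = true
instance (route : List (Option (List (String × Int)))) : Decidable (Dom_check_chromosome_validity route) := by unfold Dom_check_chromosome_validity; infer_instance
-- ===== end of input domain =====

-- B replaces len(set(...)) by sort + one adjacent-distinct counting pass (objective: alternative).
-- ===== PORT A =====
-- 'if city:' — None and the empty dict are falsy
def pvTruthy (city : Option (List (String × Int))) : Bool :=
  match city with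
  | none => false
  | some d => !d.isEmpty

-- city["number"]; Pre_ guarantees the key is present for every truthy city, so getD's default is never used
def pvNumber (city : Option (List (String × Int))) : Int :=
  match city with
  | none => 0
  | some d => ((PySem.Dict.mk d).get? "number").getD 0

def check_chromosome_validity (route : List (Option (List (String × Int)))) : Bool :=
  let route_as_ints := route.foldl
    (fun acc city => if pvTruthy city then acc ++ [pvNumber city] else acc) []
  if route.length = (PySem.Set.ofList route_as_ints).length then false else true

-- ===== PORT B =====
def check_chromosome_validity_alt (route : List (Option (List (String × Int)))) : Bool :=
  let nums := PySem.List.sorted ((route.filter pvTruthy).map pvNumber) (fun x => x) false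
  -- nums[1:] on a list is List.drop 1 (exact for a nonnegative slice start)
  let distinct := (if nums = [] then 0 else 1)
    + (nums.zip (nums.drop 1)).countP (fun p => p.1 != p.2)
  decide (distinct ≠ route.length)

-- ===== PRECONDITION & SPEC =====
def pvNumberPresent (city : Option (List (String × Int))) : Bool :=
  match city with
  | none => true
  | some d => ((PySem.Dict.mk d).get? "number").isSome

-- Pre_ excludes exactly the inputs where A raises KeyError: a truthy (nonempty) city dict without key "number".
def Pre_check_chromosome_validity (route : List (Option (List (String × Int)))) : Prop :=
  ∀ city ∈ route, pvTruthy city = true → (pvNumberPresent city) = true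

instance (route : List (Option (List (String × Int)))) : Decidable (Pre_check_chromosome_validity route) := by unfold Pre_check_chromosome_validity; infer_instance

def pvWitness_check_chromosome_validity : (List (Option (List (String × Int)))) :=
  [some [("number", 1)], none, some [("number", 1)]]

def Spec_check_chromosome_validity (route : List (Option (List (String × Int)))) (out : Bool) : Prop := out = check_chromosome_validity_alt route
instance (route : List (Option (List (String × Int)))) (out : Bool) : Decidable (Spec_check_chromosome_validity route out) := by unfold Spec_check_chromosome_validity; infer_instance

-- ===== CLAIM (what is proved, stated in full; the proofs are below) =====
def Claim_equal_check_chromosome_validity : Prop := ∀ (route : List (Option (List (String × Int)))), Dom_check_chromosome_validity route → Pre_check_chromosome_validity route → Spec_check_chromosome_validity route (check_chromosome_validity route)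

-- ===== LEMMAS AND PROOFS =====

-- adjacent-distinct count of a (≤)-sorted list = number of distinct elements
theorem pvCountDistinct_card (s : List Int) (hs : s.Pairwise (· ≤ ·)) :
    ((if s = [] then 0 else 1) + (s.zip (s.drop 1)).countP (fun p => p.1 != p.2))
      = s.toFinset.card := by
  induction s with
  | nil => simp
  | cons x t ih =>
    cases t with
    | nil => simp
    | cons y u =>
      rcases List.pairwise_cons.mp hs with ⟨h1, htl⟩
      have ih' := ih htl
      have hz : (x :: y :: u).zip ((x :: y :: u).drop 1)
          = (x, y) :: ((y :: u).zip ((y :: u).drop 1)) := rfl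
      rw [hz, List.countP_cons]
      by_cases hxy : x = y
      · subst hxy
        simpa [List.toFinset_cons, Finset.insert_idem] using ih'
      · have hnot : x ∉ (y :: u).toFinset := by
          simp only [List.mem_toFinset, List.mem_cons]
          rintro (rfl | hz2)
          · exact hxy rfl
          · rcases List.pairwise_cons.mp htl with ⟨hy, _⟩
            exact hxy (le_antisymm (h1 y (by simp)) (le_trans (hy x hz2) (h1 x (by simp [hz2]))))
        have hbne : (x != y) = true := by simp [hxy]
        rw [List.toFinset_cons, Finset.card_insert_of_notMem hnot]
        simp only [hbne, if_true,
          show (x :: y :: u : List Int) ≠ [] from by simp,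
          show (y :: u : List Int) ≠ [] from by simp, if_false] at ih' ⊢
        omega

theorem pvOfList_card (xs : List Int) :
    (PySem.Set.ofList xs).length = xs.toFinset.card := by
  have hnd := PySem.Set.nodup_ofList (xs := xs)
  have h : (PySem.Set.ofList xs).toFinset = xs.toFinset := by
    ext z; simp [PySem.Set.mem_ofList]
  rw [← h, List.toFinset_card_of_nodup hnd]

-- ===== VERDICT (by name: the statement is the Claim_ definition above) =====
theorem check_chromosome_validity_spec : Claim_equal_check_chromosome_validity := by
  intro route _ _
  unfold Spec_check_chromosome_validity check_chromosome_validity check_chromosome_validity_alt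
  rw [PySem.List.foldl_append_if]
  simp only [List.nil_append]
  set nums0 := (route.filter pvTruthy).map pvNumber with hn
  set s := PySem.List.sorted nums0 (fun x => x) false with hsdef
  have hperm : s.Perm nums0 := PySem.List.sorted_perm ..
  have hpw : s.Pairwise (· ≤ ·) := by
    have := PySem.List.sorted_pairwise (xs := nums0) (key := fun x => x)
    simpa using this
  have hcd := pvCountDistinct_card s hpw
  have hfin : s.toFinset = nums0.toFinset := by
    ext z; simp [hperm.mem_iff]
  have hcard : (PySem.Set.ofList nums0).length = s.toFinset.card := by
    rw [pvOfList_card, hfin]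
  simp only [hcd, hcard]
  by_cases h : route.length = s.toFinset.card
  · simp [h]
  · have h2 : s.toFinset.card ≠ route.length := fun hh => h hh.symm
    simp [h, h2]
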